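-- pv_equiv track=rewrite | github.com/XV25/AN_Project | asmtohex.py | compute_hex_instructions
-- ===== SOURCE A (Python) =====
-- def compute_hex_instructions(numInstructions):
--     """
--     Transforme la liste de nombres données en entrée en instructions héxadécimales.
--     (à noter que le codage de ces instructions diffèrent selon le type d'opération).
--
--     Paramètres :
--     ------------
--         numInstructions : liste contenant l'ensemble des instructions, sous forme
--         de liste de liste de nombres.
--
--     Renvoie :
--     -----------
--         hexInstructions : liste contenant l'ensemble des instructions héxadécimales
--     """
--     hexInstructions = []
--
--     for numInstr in numInstructions:
--         decInstr = 0
--         decInstr += (numInstr[0]<<27)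
--
--         if len(numInstr)>1:
--             if numInstr[0] == 15:
--                 decInstr +=(numInstr[1]<<26)
--                 decInstr +=(numInstr[2]<<5)
--                 decInstr +=(numInstr[3])
--
--             elif (numInstr[0] == 16) or (numInstr[0] == 17):
--                 decInstr += (numInstr[1]<<22)
--                 decInstr += numInstr[2]
--             elif numInstr[0] == 18:
--                 decInstr += numInstr[1]
--
--             else :
--                 decInstr += (numInstr[1]<<22)
--                 decInstr += (numInstr[2]<<21)
--                 decInstr += (numInstr[3]<<5)
--                 decInstr+= (numInstr[4])
--
--         hexInstructions.append(hex(decInstr))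
--     return(hexInstructions)
-- ===== SOURCE B (Python) =====
-- # Horner-style encoder: fields are packed by repeatedly shifting the accumulator
-- # by the width gap to the next field and adding it, instead of OR-ing each field
-- # at its absolute bit position.
-- _WIDTHS = {15: (1, 21, 5), 16: (5, 22), 17: (5, 22), 18: (27,)}
--
--
-- def compute_hex_instructions(numInstructions):
--     out = []
--     for instr in numInstructions:
--         dec = instr[0]
--         if len(instr) > 1:
--             for i, w in enumerate(_WIDTHS.get(dec, (5, 1, 16, 5)), 1):
--                 dec = (dec << w) + instr[i]
--         else:
--             dec <<= 27
--         out.append(hex(dec))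
--     return out
-- ===== Notes on version B (the rewrite author's own statement) =====
-- stated objective: alternative
-- what changed: replaced A's scheme of shifting every field independently to its absolute bit position and adding into an accumulator by a Horner-style packer that repeatedly shifts the running value by the width gap to the next field and adds it, driven by a per-opcode width list
import Mathlib
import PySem

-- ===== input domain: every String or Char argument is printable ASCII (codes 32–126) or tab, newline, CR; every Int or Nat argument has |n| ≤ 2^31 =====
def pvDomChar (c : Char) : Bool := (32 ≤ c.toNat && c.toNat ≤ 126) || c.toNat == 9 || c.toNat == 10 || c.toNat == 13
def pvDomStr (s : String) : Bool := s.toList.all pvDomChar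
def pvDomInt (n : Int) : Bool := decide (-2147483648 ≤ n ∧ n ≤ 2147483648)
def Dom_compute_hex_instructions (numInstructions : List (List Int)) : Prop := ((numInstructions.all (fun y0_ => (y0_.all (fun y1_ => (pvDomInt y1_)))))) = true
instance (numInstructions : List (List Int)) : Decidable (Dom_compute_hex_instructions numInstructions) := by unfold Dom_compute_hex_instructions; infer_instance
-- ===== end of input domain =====

-- B packs the fields Horner-style (shift the accumulator by the width gap, add the next field) instead of A's absolute-position shift-and-add (alternative; same cost).

-- shared helper: Python's built-in hex(n) (lowercase digits, '-0x…' for negatives), exact on all Int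
def pvHexDigit (n : Nat) : Char := if n < 10 then Char.ofNat (48 + n) else Char.ofNat (87 + n)

def pvHexChars (n : Nat) : List Char :=
  if n = 0 then [] else pvHexChars (n / 16) ++ [pvHexDigit (n % 16)]
decreasing_by exact Nat.div_lt_self (Nat.pos_of_ne_zero (by assumption)) (by omega)

def pyHex (n : Int) : String :=
  if n < 0 then "-0x" ++ String.ofList (pvHexChars n.natAbs)
  else if n = 0 then "0x0"
  else "0x" ++ String.ofList (pvHexChars n.natAbs)

-- ===== PORT A =====
-- loop body of A: the decimal value decInstr for one instruction (numInstr[i] ported as pyGetD; Pre_ keeps indices in range)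
def pvDecA (numInstr : List Int) : Int :=
  let decInstr : Int := 0 + (PySem.List.pyGetD numInstr 0 0) <<< (27:Nat)
  if 1 < numInstr.length then
    if PySem.List.pyGetD numInstr 0 0 = 15 then
      decInstr + (PySem.List.pyGetD numInstr 1 0) <<< (26:Nat) + (PySem.List.pyGetD numInstr 2 0) <<< (5:Nat)
        + PySem.List.pyGetD numInstr 3 0
    else if PySem.List.pyGetD numInstr 0 0 = 16 ∨ PySem.List.pyGetD numInstr 0 0 = 17 then
      decInstr + (PySem.List.pyGetD numInstr 1 0) <<< (22:Nat) + PySem.List.pyGetD numInstr 2 0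
    else if PySem.List.pyGetD numInstr 0 0 = 18 then
      decInstr + PySem.List.pyGetD numInstr 1 0
    else
      decInstr + (PySem.List.pyGetD numInstr 1 0) <<< (22:Nat) + (PySem.List.pyGetD numInstr 2 0) <<< (21:Nat)
        + (PySem.List.pyGetD numInstr 3 0) <<< (5:Nat) + PySem.List.pyGetD numInstr 4 0
  else decInstr

def compute_hex_instructions (numInstructions : List (List Int)) : List String :=
  numInstructions.foldl (fun hexInstructions numInstr => hexInstructions ++ [pyHex (pvDecA numInstr)]) []

-- ===== PORT B =====
-- the _WIDTHS dict of Source B (width gap from each field to the next)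
def pvWidths : PySem.Dict Int (List Nat) :=
  PySem.Dict.ofList [(15, [1, 21, 5]), (16, [5, 22]), (17, [5, 22]), (18, [27])]

-- Source B's loop body: Horner-style packing of the fields
def pvEncodeB (instr : List Int) : String :=
  let dec : Int := PySem.List.pyGetD instr 0 0
  let dec :=
    if 1 < instr.length then
      (PySem.List.enumerate (PySem.Dict.getD pvWidths dec [5, 1, 16, 5]) 1).foldl
        (fun d p => (d <<< p.2) + PySem.List.pyGetD instr p.1 0) dec
    else dec <<< (27:Nat)
  pyHex dec

def compute_hex_instructions_alt (numInstructions : List (List Int)) : List String :=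
  (numInstructions.foldl (fun out instr => out ++ [pvEncodeB instr]) [])

-- ===== PRECONDITION & SPEC =====
-- Pre_ excludes exactly the inputs on which Python A raises IndexError: an empty inner list,
-- or an inner list of length > 1 that is shorter than its opcode's field count.
def Pre_compute_hex_instructions (numInstructions : List (List Int)) : Prop :=
  ∀ numInstr ∈ numInstructions, numInstr ≠ [] ∧
    (1 < numInstr.length →
      (numInstr.headD 0 = 15 → 4 ≤ numInstr.length) ∧
      (numInstr.headD 0 = 16 ∨ numInstr.headD 0 = 17 → 3 ≤ numInstr.length) ∧
      (numInstr.headD 0 ≠ 15 ∧ numInstr.headD 0 ≠ 16 ∧ numInstr.headD 0 ≠ 17 ∧ numInstr.headD 0 ≠ 18 →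
        5 ≤ numInstr.length))

instance (numInstructions : List (List Int)) : Decidable (Pre_compute_hex_instructions numInstructions) := by
  unfold Pre_compute_hex_instructions; infer_instance

def pvWitness_compute_hex_instructions : List (List Int) := [[15, 1, 2, 3], [18, 5], [16, 3, 4], [2, 1, 0, 3, 4], [0]]

def Spec_compute_hex_instructions (numInstructions : List (List Int)) (out : List String) : Prop :=
  out = compute_hex_instructions_alt numInstructions
instance (numInstructions : List (List Int)) (out : List String) : Decidable (Spec_compute_hex_instructions numInstructions out) := by
  unfold Spec_compute_hex_instructions; infer_instance

-- ===== CLAIM =====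
def Claim_equal_compute_hex_instructions : Prop := ∀ (numInstructions : List (List Int)), Dom_compute_hex_instructions numInstructions → Pre_compute_hex_instructions numInstructions → Spec_compute_hex_instructions numInstructions (compute_hex_instructions numInstructions)

-- ===== LEMMAS AND PROOFS =====

theorem pvWidths_eq : pvWidths = PySem.Dict.mk [(15, [1, 21, 5]), (16, [5, 22]), (17, [5, 22]), (18, [27])] := by decide

-- Pre_'s per-instruction condition
def pvOk (numInstr : List Int) : Prop :=
  numInstr ≠ [] ∧
    (1 < numInstr.length →
      (numInstr.headD 0 = 15 → 4 ≤ numInstr.length) ∧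
      (numInstr.headD 0 = 16 ∨ numInstr.headD 0 = 17 → 3 ≤ numInstr.length) ∧
      (numInstr.headD 0 ≠ 15 ∧ numInstr.headD 0 ≠ 16 ∧ numInstr.headD 0 ≠ 17 ∧ numInstr.headD 0 ≠ 18 →
        5 ≤ numInstr.length))

-- the two per-instruction encodings agree on any instruction Pre_ admits
theorem pvEncode_eq (instr : List Int) (h : pvOk instr) : pyHex (pvDecA instr) = pvEncodeB instr := by
  obtain ⟨hne, hlen⟩ := h
  match instr with
  | [] => exact absurd rfl hne
  | [a] =>
      simp [pvDecA, pvEncodeB, PySem.List.pyGetD_ofNat']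
  | a :: b :: rest =>
      have hl : 1 < (a :: b :: rest).length := by simp
      obtain ⟨h15, h1617, hdef⟩ := hlen hl
      simp only [List.headD_cons] at h15 h1617 hdef
      by_cases ha15 : a = 15
      · obtain ⟨c, d, rest', rfl⟩ : ∃ c d rest', rest = c :: d :: rest' := by
          have := h15 ha15
          match rest with
          | c :: d :: r => exact ⟨c, d, r, rfl⟩
          | [] | [_] => simp at this
        subst ha15
        simp [pvDecA, pvEncodeB, pvWidths_eq, PySem.Dict.getD, PySem.Dict.get?,
          PySem.List.enumerate, PySem.List.pyGetD_ofNat', List.foldl,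
          Int.shiftLeft_eq]
        congr 1; ring
      · by_cases ha1617 : a = 16 ∨ a = 17
        · obtain ⟨c, rest', rfl⟩ : ∃ c rest', rest = c :: rest' := by
            have := h1617 ha1617
            match rest with
            | c :: r => exact ⟨c, r, rfl⟩
            | [] => simp at this
          rcases ha1617 with rfl | rfl <;>
            · simp [pvDecA, pvEncodeB, pvWidths_eq, PySem.Dict.getD, PySem.Dict.get?,
                PySem.List.enumerate, PySem.List.pyGetD_ofNat', List.foldl,
                Int.shiftLeft_eq]
              congr 1; ring
        · by_cases ha18 : a = 18
          · subst ha18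
            simp [pvDecA, pvEncodeB, pvWidths_eq, PySem.Dict.getD, PySem.Dict.get?,
              PySem.List.enumerate, PySem.List.pyGetD_ofNat', List.foldl,
              Int.shiftLeft_eq]
          · push_neg at ha1617
            obtain ⟨c, d, e, rest', rfl⟩ : ∃ c d e rest', rest = c :: d :: e :: rest' := by
              have := hdef ⟨ha15, ha1617.1, ha1617.2, ha18⟩
              match rest with
              | c :: d :: e :: r => exact ⟨c, d, e, r, rfl⟩
              | [] | [_] | [_, _] => simp at this
            simp [pvDecA, pvEncodeB, pvWidths_eq, PySem.Dict.getD, PySem.Dict.get?,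
              PySem.List.enumerate, PySem.List.pyGetD_ofNat', List.foldl,
              Int.shiftLeft_eq, beq_iff_eq, ha15, ha18, ha1617.1, ha1617.2,
              Ne.symm ha15, Ne.symm ha1617.1, Ne.symm ha1617.2, Ne.symm ha18]
            congr 1; ring

-- ===== VERDICT =====
theorem compute_hex_instructions_spec : Claim_equal_compute_hex_instructions := by
  intro numInstructions _ hpre
  unfold Spec_compute_hex_instructions compute_hex_instructions compute_hex_instructions_alt
  rw [PySem.List.foldl_append_singleton_eq_map, PySem.List.foldl_append_singleton_eq_map]
  exact List.map_congr_left fun instr hmem => pvEncode_eq instr (hpre instr hmem)
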